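-- pv_equiv track=rewrite | github.com/n-toto/STEP-hw1 | hw1.py | mk_match
-- ===== SOURCE A (Python) =====
-- import collections
--
-- def mk_match(new_dic, s):
--     counter = collections.Counter(s)
--     l = []
--     for word in new_dic:
--         letters = collections.Counter(word)
--         if letters & counter == letters:
--             l.append(word)
--     return l
-- ===== SOURCE B (Python) =====
-- def mk_match(new_dic, s):
--     pool = sorted(s)
--     out = []
--     for word in new_dic:
--         w = sorted(word)
--         i = j = 0
--         ok = True
--         while i < len(w):
--             # binary search: first index lo >= j with pool[lo] >= w[i]
--             lo, hi = j, len(pool)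
--             while lo < hi:
--                 mid = (lo + hi) // 2
--                 if pool[mid] < w[i]:
--                     lo = mid + 1
--                 else:
--                     hi = mid
--             if lo == len(pool) or pool[lo] != w[i]:
--                 ok = False
--                 break
--             i += 1
--             j = lo + 1
--         if ok:
--             out.append(word)
--     return out
-- ===== Notes on version B (the rewrite author's own statement) =====
-- stated objective: alternative
-- what changed: B drops Counters entirely: it sorts the letters of s once and checks each word by matching its sorted characters as a subsequence of the sorted pool, galloping forward with a binary search for each character instead of building and comparing per-word Counters.
import Mathlib
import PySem

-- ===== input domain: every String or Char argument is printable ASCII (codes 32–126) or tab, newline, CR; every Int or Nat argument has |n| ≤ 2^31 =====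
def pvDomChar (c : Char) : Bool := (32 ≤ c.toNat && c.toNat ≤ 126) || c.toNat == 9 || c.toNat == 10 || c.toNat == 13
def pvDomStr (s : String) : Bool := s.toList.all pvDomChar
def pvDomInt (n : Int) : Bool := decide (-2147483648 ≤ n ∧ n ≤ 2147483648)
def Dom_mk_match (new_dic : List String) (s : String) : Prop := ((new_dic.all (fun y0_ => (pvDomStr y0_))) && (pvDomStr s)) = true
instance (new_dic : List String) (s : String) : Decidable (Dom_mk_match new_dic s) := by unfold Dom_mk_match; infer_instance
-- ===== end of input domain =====

-- B drops Counters entirely: it sorts s once and matches each sorted word as a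
-- subsequence of the sorted pool via binary-search galloping (alternative algorithm).

-- ===== PORT A =====
-- Counter.__and__: iterate self's items, keep min(count, other[elem]) when positive
def pyCounterAnd (a b : PySem.Dict Char Int) : PySem.Dict Char Int :=
  a.items.foldl (fun r p =>
    let n := min p.2 (b.getD p.1 0)
    if 0 < n then r.insert p.1 n else r) PySem.Dict.empty

-- dict/Counter equality on dicts whose values are all positive: same size and every item of a found in b
def pyDictEq (a b : PySem.Dict Char Int) : Bool :=
  a.size == b.size && a.items.all (fun p => b.get? p.1 == some p.2)

def mk_match (new_dic : List String) (s : String) : List String :=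
  let counter := PySem.Dict.counter s.toList
  new_dic.foldl (fun l word =>
    let letters := PySem.Dict.counter word.toList
    if pyDictEq (pyCounterAnd letters counter) letters then l ++ [word] else l) []

-- ===== PORT B =====
-- the inner 'while lo < hi' binary search of the Python, verbatim
def bisectFirstGe (pool : List Char) (a : Char) (lo hi : Nat) : Nat :=
  if _h : lo < hi then
    let mid := (lo + hi) / 2
    if pool.getD mid (Char.ofNat 0) < a then bisectFirstGe pool a (mid + 1) hi
    else bisectFirstGe pool a lo mid
  else lo
termination_by hi - lo
decreasing_by all_goals omega

-- the outer 'while i < len(w)' loop: recursion on the remaining characters of w, carrying j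
def scanIdx (pool : List Char) : List Char → Nat → Bool
  | [], _ => true
  | a :: rest, j =>
      let lo := bisectFirstGe pool a j pool.length
      if lo = pool.length then false
      else if pool.getD lo (Char.ofNat 0) ≠ a then false
      else scanIdx pool rest (lo + 1)

def mk_match_alt (new_dic : List String) (s : String) : List String :=
  let pool := PySem.List.sorted s.toList (fun x => x) false
  new_dic.foldl (fun out word =>
    if scanIdx pool (PySem.List.sorted word.toList (fun x => x) false) 0 then out ++ [word] else out) []

-- ===== PRECONDITION & SPEC =====
def Spec_mk_match (new_dic : List String) (s : String) (out : List String) : Prop := out = mk_match_alt new_dic s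
instance (new_dic : List String) (s : String) (out : List String) : Decidable (Spec_mk_match new_dic s out) := by unfold Spec_mk_match; infer_instance

-- ===== CLAIM (what is proved, stated in full; the proofs are below) =====
def Claim_equal_mk_match : Prop := ∀ (new_dic : List String) (s : String), Dom_mk_match new_dic s → Spec_mk_match new_dic s (mk_match new_dic s)

-- ===== LEMMAS AND PROOFS =====

-- proof-side reference scan: the plain two-pointer merge that the galloping loop accelerates
def sub2p : List Char → List Char → Bool
  | [], _ => true
  | _ :: _, [] => false
  | a :: w, b :: p =>
      if a = b then sub2p w p
      else if b < a then sub2p (a :: w) p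
      else false
termination_by _ p => p.length


-- the two-pointer scan on sorted lists decides multiset containment
lemma sub2p_iff : ∀ (p w : List Char), w.Pairwise (· ≤ ·) → p.Pairwise (· ≤ ·) →
    (sub2p w p = true ↔ ∀ c, w.count c ≤ p.count c) := by
  intro p
  induction p with
  | nil =>
      intro w _ _
      cases w with
      | nil => simp [sub2p]
      | cons a w' =>
          simp only [sub2p]
          constructor
          · intro h; cases h
          · intro h
            have := h a
            simp only [List.count_nil, List.count_cons_self] at this
            omega
  | cons b p' ih =>
      intro w hw hp
      cases w with
      | nil => simp [sub2p]
      | cons a w' =>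
          have hwall : ∀ x ∈ w', a ≤ x := (List.pairwise_cons.mp hw).1
          have hpall : ∀ x ∈ p', b ≤ x := (List.pairwise_cons.mp hp).1
          have hw' := (List.pairwise_cons.mp hw).2
          have hp' := (List.pairwise_cons.mp hp).2
          simp only [sub2p]
          by_cases hab : a = b
          · subst hab
            rw [if_pos rfl, ih w' hw' hp']
            constructor
            · intro h c
              have := h c
              by_cases hc : c = a
              · subst hc; simp only [List.count_cons_self]; omega
              · rw [List.count_cons_of_ne (Ne.symm hc), List.count_cons_of_ne (Ne.symm hc)]; omega
            · intro h c
              have := h c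
              by_cases hc : c = a
              · subst hc; simp only [List.count_cons_self] at this; omega
              · rw [List.count_cons_of_ne (Ne.symm hc), List.count_cons_of_ne (Ne.symm hc)] at this; omega
          · rw [if_neg hab]
            by_cases hba : b < a
            · rw [if_pos hba, ih (a :: w') hw hp']
              constructor
              · intro h c
                have := h c
                by_cases hc : c = b
                · subst hc; simp only [List.count_cons_self]; omega
                · rw [List.count_cons_of_ne (Ne.symm hc)]; omega
              · intro h c
                by_cases hc : c = b
                · subst hc
                  have hnotmem : c ∉ a :: w' := by
                    intro hc
                    rcases List.mem_cons.mp hc with rfl | hc'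
                    · exact lt_irrefl _ hba
                    · exact absurd (hwall c hc') (not_le.mpr hba)
                  rw [List.count_eq_zero.mpr hnotmem]
                  exact Nat.zero_le _
                · have := h c
                  rw [List.count_cons_of_ne (Ne.symm hc)] at this
                  exact this
            · rw [if_neg hba]
              have halt : a < b := lt_of_le_of_ne (not_lt.mp hba) hab
              constructor
              · intro h; cases h
              · intro h
                exfalso
                have hnotmem : a ∉ b :: p' := by
                  intro hc
                  rcases List.mem_cons.mp hc with rfl | hc'
                  · exact lt_irrefl _ halt
                  · exact absurd (hpall a hc') (not_le.mpr halt)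
                have := h a
                rw [List.count_eq_zero.mpr hnotmem] at this
                simp only [List.count_cons_self] at this
                omega

-- items of the Counter.__and__ fold over fresh, distinct keys
lemma foldAnd_items (l : List (Char × Int)) (b r : PySem.Dict Char Int)
    (hnd : (l.map Prod.fst).Nodup) (hfresh : ∀ p ∈ l, r.contains p.1 = false) :
    (l.foldl (fun r p =>
        let n := min p.2 (b.getD p.1 0)
        if 0 < n then r.insert p.1 n else r) r).items =
      r.items ++ (l.filter (fun p => decide (0 < min p.2 (b.getD p.1 0)))).map
        (fun p => (p.1, min p.2 (b.getD p.1 0))) := by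
  induction l generalizing r with
  | nil => simp
  | cons p t ih =>
      simp only [List.map_cons, List.nodup_cons] at hnd
      have hfp := hfresh p (by simp)
      have hfresh' : ∀ q ∈ t, (if 0 < min p.2 (b.getD p.1 0) then r.insert p.1 (min p.2 (b.getD p.1 0)) else r).contains q.1 = false := by
        intro q hq
        have hq1 : q.1 ≠ p.1 := by
          intro he; exact hnd.1 (he ▸ List.mem_map_of_mem hq)
        split
        · rw [PySem.Dict.contains_insert]
          simp [hq1, hfresh q (List.mem_cons_of_mem _ hq)]
        · exact hfresh q (List.mem_cons_of_mem _ hq)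
      simp only [List.foldl_cons]
      rw [ih _ hnd.2 hfresh']
      by_cases hpos : 0 < min p.2 (b.getD p.1 0)
      · rw [List.filter_cons_of_pos (by simpa using hpos)]
        simp only [if_pos hpos, PySem.Dict.items_insert_of_not_contains _ _ hfp,
          List.map_cons, List.append_assoc, List.singleton_append]
      · rw [List.filter_cons_of_neg (by simpa using hpos)]
        simp [hpos]

-- A's per-word test holds iff every character of the word fits the source's counts
lemma testA_iff (w t : List Char) :
    pyDictEq (pyCounterAnd (PySem.Dict.counter w) (PySem.Dict.counter t)) (PySem.Dict.counter w) = true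
      ↔ ∀ c ∈ w, ((w.count c : Int)) ≤ ((t.count c : Int)) := by
  have hnd : ((PySem.Dict.counter w : PySem.Dict Char Int).items.map Prod.fst).Nodup := by
    rw [PySem.Dict.items_counter, List.map_map]
    simp [Function.comp_def, PySem.Set.nodup_ofList w]
  have hndk : (PySem.Dict.counter w : PySem.Dict Char Int).keys.Nodup :=
    PySem.Dict.nodup_keys_counter w
  have hitems := foldAnd_items (PySem.Dict.counter w : PySem.Dict Char Int).items
    (PySem.Dict.counter t) PySem.Dict.empty hnd (by intro p _; simp)
  have hempty : (PySem.Dict.empty : PySem.Dict Char Int).items = [] := rfl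
  rw [hempty, List.nil_append] at hitems
  unfold pyDictEq pyCounterAnd
  simp only [PySem.Dict.size]
  rw [hitems]
  constructor
  · intro heq c hc
    simp only [Bool.and_eq_true, beq_iff_eq, List.all_eq_true, List.length_map] at heq
    obtain ⟨hsize, hall⟩ := heq
    have hkeep := (List.length_filter_eq_length_iff).mp hsize
    have hcmem : (c, (w.count c : Int)) ∈ (PySem.Dict.counter w : PySem.Dict Char Int).items := by
      rw [PySem.Dict.items_counter]
      exact List.mem_map_of_mem ((PySem.Set.mem_ofList w c).mpr hc)
    have hpos := hkeep _ hcmem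
    rw [decide_eq_true_eq] at hpos
    have hin : (c, (w.count c : Int)) ∈ ((PySem.Dict.counter w : PySem.Dict Char Int).items.filter
        (fun p => decide (0 < min p.2 ((PySem.Dict.counter t : PySem.Dict Char Int).getD p.1 0)))) :=
      List.mem_filter.mpr ⟨hcmem, by simpa using hpos⟩
    have hmem2 := List.mem_map_of_mem
      (f := fun p => (p.1, min p.2 ((PySem.Dict.counter t : PySem.Dict Char Int).getD p.1 0))) hin
    have hge := hall _ hmem2
    have hget : (PySem.Dict.counter w : PySem.Dict Char Int).get? c = some (w.count c : Int) :=
      PySem.Dict.get?_of_mem_items _ hcmem hndk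
    have hge' : (PySem.Dict.counter w : PySem.Dict Char Int).get? c
        = some (min ((w.count c : Int)) ((PySem.Dict.counter t : PySem.Dict Char Int).getD c 0)) := by
      simpa using hge
    have hmin : ((w.count c : Int))
        = min ((w.count c : Int)) ((PySem.Dict.counter t : PySem.Dict Char Int).getD c 0) :=
      Option.some_injective _ (hget.symm.trans hge')
    rw [PySem.Dict.getD_counter] at hmin hpos
    simp only at hpos
    omega
  · intro hall
    have hfix : ∀ p ∈ (PySem.Dict.counter w : PySem.Dict Char Int).items,
        0 < min p.2 ((PySem.Dict.counter t : PySem.Dict Char Int).getD p.1 0) ∧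
        min p.2 ((PySem.Dict.counter t : PySem.Dict Char Int).getD p.1 0) = p.2 := by
      intro p hp
      rw [PySem.Dict.items_counter] at hp
      obtain ⟨k, hk, rfl⟩ := List.mem_map.mp hp
      have hkw : k ∈ w := (PySem.Set.mem_ofList w k).mp hk
      have hle := hall k hkw
      have hpos : (0 : Int) < (w.count k : Int) := by
        have : 0 < w.count k := List.count_pos_iff.mpr hkw
        exact_mod_cast this
      refine ⟨?_, ?_⟩
      · show (0 : Int) < min ((w.count k : Int)) ((PySem.Dict.counter t : PySem.Dict Char Int).getD k 0)
        rw [PySem.Dict.getD_counter]; omega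
      · show min ((w.count k : Int)) ((PySem.Dict.counter t : PySem.Dict Char Int).getD k 0) = ((w.count k : Int))
        rw [PySem.Dict.getD_counter]; omega
    have hfilter : ((PySem.Dict.counter w : PySem.Dict Char Int).items.filter
        (fun p => decide (0 < min p.2 ((PySem.Dict.counter t : PySem.Dict Char Int).getD p.1 0))))
        = (PySem.Dict.counter w : PySem.Dict Char Int).items :=
      List.filter_eq_self.mpr (fun p hp => by simpa using (hfix p hp).1)
    rw [hfilter]
    have hmap : ((PySem.Dict.counter w : PySem.Dict Char Int).items.map
        (fun p => (p.1, min p.2 ((PySem.Dict.counter t : PySem.Dict Char Int).getD p.1 0))))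
        = (PySem.Dict.counter w : PySem.Dict Char Int).items := by
      rw [List.map_congr_left (fun p hp => by rw [(hfix p hp).2]), List.map_id']
    rw [hmap]
    simp only [Bool.and_eq_true, beq_iff_eq, List.all_eq_true]
    refine ⟨trivial, ?_⟩
    intro p hp
    have : (PySem.Dict.counter w : PySem.Dict Char Int).get? p.1 = some p.2 := by
      refine PySem.Dict.get?_of_mem_items _ ?_ hndk
      simpa using hp
    simp [this]

-- B's per-word test, via sorted permutations, is the same containment condition
-- sorted lists read off monotonically through getD
lemma getD_mono_sorted (pool : List Char) (hs : pool.Pairwise (· ≤ ·))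
    {k m : Nat} (hk : k ≤ m) (hm : m < pool.length) :
    pool.getD k (Char.ofNat 0) ≤ pool.getD m (Char.ofNat 0) := by
  rw [List.getD_eq_getElem pool _ (lt_of_le_of_lt hk hm), List.getD_eq_getElem pool _ hm]
  rcases Nat.lt_or_ge k m with hlt | hge
  · exact List.pairwise_iff_getElem.mp hs k m _ _ hlt
  · have : k = m := le_antisymm hk hge
    subst this; exact le_refl _

-- the binary search finds the first index ≥ lo whose entry is ≥ a (or hi)
lemma bisect_spec (pool : List Char) (a : Char) (hs : pool.Pairwise (· ≤ ·)) :
    ∀ n lo hi, hi - lo = n → lo ≤ hi → hi ≤ pool.length →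
      lo ≤ bisectFirstGe pool a lo hi ∧ bisectFirstGe pool a lo hi ≤ hi ∧
      (∀ k, lo ≤ k → k < bisectFirstGe pool a lo hi → pool.getD k (Char.ofNat 0) < a) ∧
      (bisectFirstGe pool a lo hi < hi → ¬ pool.getD (bisectFirstGe pool a lo hi) (Char.ofNat 0) < a) := by
  intro n
  induction n using Nat.strong_induction_on with
  | _ n ih =>
      intro lo hi hn hlh hhl
      rw [bisectFirstGe]
      by_cases h : lo < hi
      · simp only [dif_pos h]
        by_cases hmid : pool.getD ((lo + hi) / 2) (Char.ofNat 0) < a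
        · simp only [if_pos hmid]
          have hrec := ih (hi - ((lo + hi) / 2 + 1)) (by omega) ((lo + hi) / 2 + 1) hi rfl (by omega) hhl
          refine ⟨by omega, hrec.2.1, ?_, hrec.2.2.2⟩
          intro k hk1 hk2
          by_cases hkm : (lo + hi) / 2 + 1 ≤ k
          · exact hrec.2.2.1 k hkm hk2
          · have hle : k ≤ (lo + hi) / 2 := by omega
            exact lt_of_le_of_lt (getD_mono_sorted pool hs hle (by omega)) hmid
        · simp only [if_neg hmid]
          have hrec := ih ((lo + hi) / 2 - lo) (by omega) lo ((lo + hi) / 2) rfl (by omega) (by omega)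
          refine ⟨hrec.1, by omega, hrec.2.2.1, ?_⟩
          intro _
          rcases Nat.lt_or_ge (bisectFirstGe pool a lo ((lo + hi) / 2)) ((lo + hi) / 2) with hlt | hge
          · exact hrec.2.2.2 hlt
          · have : bisectFirstGe pool a lo ((lo + hi) / 2) = (lo + hi) / 2 :=
              le_antisymm hrec.2.1 hge
            rw [this]; exact hmid
      · simp only [dif_neg h]
        exact ⟨le_refl _, by omega, fun k hk1 hk2 => absurd (lt_of_le_of_lt hk1 hk2) (by omega),
          fun hlt => absurd hlt (by omega)⟩

-- sub2p ignores a leading block of characters smaller than the word's head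
lemma sub2p_skip (a : Char) (w : List Char) :
    ∀ q t, (∀ x ∈ q, x < a) → sub2p (a :: w) (q ++ t) = sub2p (a :: w) t := by
  intro q
  induction q with
  | nil => intro t _; rfl
  | cons b q' ih =>
      intro t hq
      have hb : b < a := hq b (by simp)
      have : sub2p (a :: w) ((b :: q') ++ t) = sub2p (a :: w) (q' ++ t) := by
        simp only [List.cons_append, sub2p, if_neg (ne_of_gt hb), if_pos hb]
      rw [this, ih t (fun x hx => hq x (List.mem_cons_of_mem _ hx))]

-- the galloping index scan equals the plain merge scan on the remaining pool
lemma scanIdx_eq_sub2p (pool : List Char) (hs : pool.Pairwise (· ≤ ·)) :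
    ∀ w j, j ≤ pool.length → scanIdx pool w j = sub2p w (pool.drop j) := by
  intro w
  induction w with
  | nil => intro j _; simp [scanIdx, sub2p]
  | cons a rest ih =>
      intro j hj
      obtain ⟨h1, h2, h3, h4⟩ :=
        bisect_spec pool a hs (pool.length - j) j pool.length rfl hj (le_refl _)
      set r := bisectFirstGe pool a j pool.length with hr
      have hsplit : pool.drop j = (pool.drop j).take (r - j) ++ pool.drop r := by
        conv_lhs => rw [← List.take_append_drop (r - j) (pool.drop j)]
        rw [List.drop_drop]
        have hrj : j + (r - j) = r := by omega
        rw [hrj]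
      have hsmall : ∀ x ∈ (pool.drop j).take (r - j), x < a := by
        intro x hx
        obtain ⟨i, hi, hxeq⟩ := List.mem_iff_getElem.mp hx
        have hil : i < r - j := by
          simp only [List.length_take, List.length_drop] at hi
          omega
        have hjr : j + i < pool.length := by omega
        have : x = pool[j + i]'hjr := by
          rw [← hxeq]
          rw [List.getElem_take, List.getElem_drop]
        rw [this]
        have := h3 (j + i) (by omega) (by omega)
        rwa [List.getD_eq_getElem pool _ hjr] at this
      have hskip : sub2p (a :: rest) (pool.drop j) = sub2p (a :: rest) (pool.drop r) := by
        rw [hsplit]; exact sub2p_skip a rest _ _ hsmall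
      simp only [scanIdx, ← hr]
      rw [hskip]
      by_cases hrl : r = pool.length
      · rw [if_pos hrl, hrl, List.drop_length]
        simp [sub2p]
      · rw [if_neg hrl]
        have hrlt : r < pool.length := lt_of_le_of_ne h2 hrl
        have hdrop : pool.drop r = pool[r]'hrlt :: pool.drop (r + 1) :=
          List.drop_eq_getElem_cons hrlt
        have hge : ¬ pool[r]'hrlt < a := by
          have := h4 hrlt
          rwa [List.getD_eq_getElem pool _ hrlt] at this
        rw [List.getD_eq_getElem pool _ hrlt]
        by_cases heq : pool[r]'hrlt = a
        · rw [if_neg (by simp [heq]), hdrop]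
          have : sub2p (a :: rest) (pool[r]'hrlt :: pool.drop (r + 1))
              = sub2p rest (pool.drop (r + 1)) := by
            simp only [sub2p, if_pos heq.symm]
          rw [this, ih (r + 1) hrlt]
        · rw [if_pos (by simp [heq]), hdrop]
          have : sub2p (a :: rest) (pool[r]'hrlt :: pool.drop (r + 1)) = false := by
            simp only [sub2p, if_neg (Ne.symm heq), if_neg hge]
          rw [this]

-- B's per-word test, via sorted permutations, is the same containment condition
lemma testB_iff (w t : List Char) :
    scanIdx (PySem.List.sorted t (fun x => x) false) (PySem.List.sorted w (fun x => x) false) 0 = true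
      ↔ ∀ c ∈ w, ((w.count c : Int)) ≤ ((t.count c : Int)) := by
  have hpw : (PySem.List.sorted w (fun x => x) false).Pairwise (· ≤ ·) := by
    simpa using PySem.List.sorted_pairwise w (fun x => x)
  have hpt : (PySem.List.sorted t (fun x => x) false).Pairwise (· ≤ ·) := by
    simpa using PySem.List.sorted_pairwise t (fun x => x)
  rw [scanIdx_eq_sub2p _ hpt _ 0 (Nat.zero_le _), List.drop_zero]
  rw [sub2p_iff _ _ hpw hpt]
  have hcw : ∀ c, (PySem.List.sorted w (fun x => x) false).count c = w.count c :=
    fun c => (PySem.List.sorted_perm w (fun x => x) false).count_eq c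
  have hct : ∀ c, (PySem.List.sorted t (fun x => x) false).count c = t.count c :=
    fun c => (PySem.List.sorted_perm t (fun x => x) false).count_eq c
  constructor
  · intro h c _
    have := h c
    rw [hcw, hct] at this
    exact_mod_cast this
  · intro h c
    rw [hcw, hct]
    by_cases hc : c ∈ w
    · exact_mod_cast h c hc
    · rw [List.count_eq_zero.mpr hc]
      exact Nat.zero_le _

-- ===== VERDICT (by name: the statement is the Claim_ definition above) =====
theorem mk_match_spec : Claim_equal_mk_match := by
  intro new_dic s _
  unfold Spec_mk_match mk_match mk_match_alt
  rw [PySem.List.foldl_append_if_eq_filter, PySem.List.foldl_append_if_eq_filter]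
  simp only [List.nil_append]
  apply List.filter_congr
  intro word _
  have hA := testA_iff word.toList s.toList
  have hB := testB_iff word.toList s.toList
  by_cases h : ∀ c ∈ word.toList, ((word.toList.count c : Int)) ≤ ((s.toList.count c : Int))
  · rw [hA.mpr h, hB.mpr h]
  · rw [Bool.eq_iff_iff.mpr ⟨fun ha => absurd (hA.mp ha) h, fun hb => absurd (hB.mp hb) h⟩]
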